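-- pv_equiv track=rewrite | github.com/soodal5629/codingTestProblemSolve | 방금그곡.py | solution
-- ===== SOURCE A (Python) =====
-- def get_time(s):
--     h, m = s.split(":")
--     return int(h) * 60 + int(m)
--
-- def trans(s):
--     if 'C#' in s: s = s.replace('C#', 'c')
--     if 'D#' in s: s = s.replace('D#', 'd')
--     if 'F#' in s: s = s.replace('F#', 'f')
--     if 'G#' in s: s = s.replace('G#', 'g')
--     if 'A#' in s: s = s.replace('A#', 'a')
--     return s
--
-- def solution(m, musicinfos):
--     answer = ''
--     arr = []
--     for i in musicinfos:
--         start, end, title, cont = i.split(',')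
--         m = trans(m)
--         cont = trans(cont)
--         play = get_time(end) - get_time(start) # 재생시간
--         l = len(m) # 길이
--         l2 = len(cont)
--         if l2 < play:
--             a, b = divmod(play, l2)
--             temp =''
--             if b == 0: temp = cont *a
--             else: temp = cont * a + cont[:b]
--         else:
--             temp = cont[:play]
--         if m in temp:
--             arr.append([play, start, title])
--     if len(arr) == 0: return '(None)'
--     arr.sort(key = lambda x:(-x[0], x[1]))
--     answer = arr[0][2]
--
--     return answer
-- ===== SOURCE B (Python) =====
-- NOTE_MAP = (('C#', 'c'), ('D#', 'd'), ('F#', 'f'), ('G#', 'g'), ('A#', 'a'))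
--
--
-- def _flat(s):
--     for old, new in NOTE_MAP:
--         s = s.replace(old, new)
--     return s
--
--
-- def _minutes(t):
--     h, mm = t.split(':')
--     return int(h) * 60 + int(mm)
--
--
-- def solution(m, musicinfos):
--     m = _flat(m)
--     best = None  # (play, start, title) of the current best match
--     for info in musicinfos:
--         start, end, title, cont = info.split(',')
--         cont = _flat(cont)
--         play = _minutes(end) - _minutes(start)
--         if play > len(cont):
--             cont = (cont * (play // len(cont) + 1))[:play]
--         else:
--             cont = cont[:play]
--         if m in cont and (best is None or play > best[0]
--                           or (play == best[0] and start < best[1])):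
--             best = (play, start, title)
--     return '(None)' if best is None else best[2]
-- ===== Notes on version B (the rewrite author's own statement) =====
-- stated objective: simpler
-- what changed: B drops the collected arr list and the final stable sort by (-play, start), maintaining a single running best candidate updated by strict comparison instead; it flattens m once before the loop (the sharp-replacement is idempotent), replaces the guarded if-chain of replacements with one loop over a note table, and builds the repeated melody window as (cont * (play // len(cont) + 1))[:play] instead of the divmod case split.
import Mathlib
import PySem

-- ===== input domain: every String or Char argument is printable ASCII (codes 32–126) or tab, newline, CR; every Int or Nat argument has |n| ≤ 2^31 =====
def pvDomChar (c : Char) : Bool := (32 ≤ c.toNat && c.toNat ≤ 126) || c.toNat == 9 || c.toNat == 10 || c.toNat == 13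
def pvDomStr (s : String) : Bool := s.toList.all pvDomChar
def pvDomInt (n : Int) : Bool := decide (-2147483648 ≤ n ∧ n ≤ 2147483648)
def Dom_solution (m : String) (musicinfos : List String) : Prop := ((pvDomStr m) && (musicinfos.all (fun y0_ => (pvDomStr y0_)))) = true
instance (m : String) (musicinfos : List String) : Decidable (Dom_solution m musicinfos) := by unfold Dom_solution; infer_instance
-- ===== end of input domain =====

-- B keeps a single running best candidate instead of collecting all matches and stable-sorting
-- them by (-play, start); equivalence of the two selection strategies is the point proved here.

-- ===== PORT A =====

-- trans(s): the guarded chain of five sharp-replacements, on char lists (Py str ⇄ List Char)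
def transC (l : List Char) : List Char :=
  let l := if PySem.Chars.isIn ['C', '#'] l then PySem.Chars.replace l ['C', '#'] ['c'] else l
  let l := if PySem.Chars.isIn ['D', '#'] l then PySem.Chars.replace l ['D', '#'] ['d'] else l
  let l := if PySem.Chars.isIn ['F', '#'] l then PySem.Chars.replace l ['F', '#'] ['f'] else l
  let l := if PySem.Chars.isIn ['G', '#'] l then PySem.Chars.replace l ['G', '#'] ['g'] else l
  let l := if PySem.Chars.isIn ['A', '#'] l then PySem.Chars.replace l ['A', '#'] ['a'] else l
  l

def transP (s : String) : String := String.ofList (transC s.toList)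

-- get_time(s); none = the unpacking or int() raised
def getTimeA (s : String) : Option Int :=
  match PySem.Str.split? s ":" with
  | some [h, mm] =>
    match PySem.Int.ofStr? h, PySem.Int.ofStr? mm with
    | some a, some b => some (a * 60 + b)
    | _, _ => none
  | _ => none

-- one iteration of A's loop; state = (current m, arr); none = an exception was raised
def stepA (st : Option (String × List (Int × String × String))) (i : String) :
    Option (String × List (Int × String × String)) :=
  match st with
  | none => none
  | some (m, arr) =>
    match PySem.Str.split? i "," with
    | some [start, end_, title, cont] =>
      let m' := transP m
      let contT := transP cont
      match getTimeA end_, getTimeA start with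
      | some te, some ts =>
        let play : Int := te - ts
        let l2 : Int := PySem.Str.len contT
        let temp? : Option (List Char) :=
          if l2 < play then
            match PySem.Int.divmod? play l2 with
            | none => none   -- divmod(play, 0) raises ZeroDivisionError
            | some (a, b) =>
              -- cont * a  is  a copies of cont (exact: Python's str*int, '' for a ≤ 0)
              if b = 0 then some (List.flatten (List.replicate a.toNat contT.toList))
              else some (List.flatten (List.replicate a.toNat contT.toList) ++
                         PySem.Chars.slice contT.toList none (some b))
          else some (PySem.Chars.slice contT.toList none (some play))
        match temp? with
        | none => none
        | some temp =>
          if PySem.Chars.isIn m'.toList temp then some (m', arr ++ [(play, start, title)])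
          else some (m', arr)
      | _, _ => none
    | _ => none

def solution (m : String) (musicinfos : List String) : String :=
  match musicinfos.foldl stepA (some (m, [])) with
  | none => ""   -- Python raised here; such inputs are excluded by Pre_solution
  | some (_, arr) =>
    if arr = [] then "(None)"
    else (((PySem.List.sorted2 arr (fun e => -e.1) (fun e => e.2.1)).headD (0, "", "")).2.2)

-- ===== PORT B =====

-- _flat(s): one loop over the note table
def flatC (l : List Char) : List Char :=
  [(['C', '#'], ['c']), (['D', '#'], ['d']), (['F', '#'], ['f']),
   (['G', '#'], ['g']), (['A', '#'], ['a'])].foldl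
    (fun s p => PySem.Chars.replace s p.1 p.2) l

def flatP (s : String) : String := String.ofList (flatC s.toList)

-- _minutes(t); none = the unpacking or int() raised
def minutesB (t : String) : Option Int :=
  match PySem.Str.split? t ":" with
  | some [h, mm] =>
    match PySem.Int.ofStr? h, PySem.Int.ofStr? mm with
    | some a, some b => some (a * 60 + b)
    | _, _ => none
  | _ => none

-- one iteration of B's loop; state = best candidate so far; outer none = an exception was raised
def stepB (mf : List Char) (st : Option (Option (Int × String × String))) (info : String) :
    Option (Option (Int × String × String)) :=
  match st with
  | none => none
  | some best =>
    match PySem.Str.split? info "," with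
    | some [start, end_, title, cont] =>
      let contF := flatP cont
      match minutesB end_, minutesB start with
      | some te, some ts =>
        let play : Int := te - ts
        let n : Int := PySem.Str.len contF
        let clip? : Option (List Char) :=
          if play > n then
            match PySem.Int.floordiv? play n with
            | none => none   -- play // 0 raises ZeroDivisionError
            | some q =>
              -- (cont * (q + 1))[:play]
              some (PySem.Chars.slice
                      (List.flatten (List.replicate (q + 1).toNat contF.toList)) none (some play))
          else some (PySem.Chars.slice contF.toList none (some play))
        match clip? with
        | none => none
        | some clip =>
          if PySem.Chars.isIn mf clip &&
              (match best with
               | none => true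
               | some c => decide (play > c.1) || (decide (play = c.1) && decide (start < c.2.1))) then
            some (some (play, start, title))
          else some best
      | _, _ => none
    | _ => none

def solution_alt (m : String) (musicinfos : List String) : String :=
  let mf := (flatP m).toList
  match musicinfos.foldl (stepB mf) (some none) with
  | none => ""   -- B raises on the same inputs; excluded by Pre_solution
  | some none => "(None)"
  | some (some e) => e.2.2

-- ===== PRECONDITION & SPEC =====

-- parse of one 'HH:MM' field, independent of both ports
def preTime? (s : String) : Option Int :=
  match PySem.Str.split? s ":" with
  | some [h, mm] =>
    match PySem.Int.ofStr? h, PySem.Int.ofStr? mm with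
    | some a, some b => some (a * 60 + b)
    | _, _ => none
  | _ => none

-- one info line is well formed: exactly 4 comma fields, both times parse, and the melody is
-- nonempty unless the play time is ≤ 0 (else Python's divmod(play, 0) raises)
def preItem (i : String) : Bool :=
  match PySem.Str.split? i "," with
  | some [start, end_, _, cont] =>
    match preTime? start, preTime? end_ with
    | some ts, some te => (cont != "" || decide (te - ts ≤ 0))
    | _, _ => false
  | _ => false

-- Pre_ excludes exactly the inputs on which the Python A raises (ValueError from unpacking or
-- int(), ZeroDivisionError from divmod); A returns on every input satisfying Pre_.
def Pre_solution (m : String) (musicinfos : List String) : Prop :=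
  musicinfos.all preItem = true
instance (m : String) (musicinfos : List String) : Decidable (Pre_solution m musicinfos) := by
  unfold Pre_solution; infer_instance

def pvWitness_solution : String × List String :=
  ("ABC", ["12:00,12:14,HELLO,C#CDEFGAB", "13:00,13:05,WORLD,ABCDEF"])

def Spec_solution (m : String) (musicinfos : List String) (out : String) : Prop := out = solution_alt m musicinfos
instance (m : String) (musicinfos : List String) (out : String) : Decidable (Spec_solution m musicinfos out) := by unfold Spec_solution; infer_instance

-- ===== CLAIM (what is proved, stated in full; the proofs are below) =====
def Claim_equal_solution : Prop := ∀ (m : String) (musicinfos : List String), Dom_solution m musicinfos → Pre_solution m musicinfos → Spec_solution m musicinfos (solution m musicinfos)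

-- ===== LEMMAS AND PROOFS =====

def repl (x r : Char) : List Char → List Char
  | a :: b :: t => if a = x ∧ b = '#' then r :: repl x r t else a :: repl x r (b :: t)
  | l => l

lemma go_repl (x r : Char) : ∀ (fuel : Nat) (l acc : List Char), l.length ≤ fuel →
    PySem.Chars.replace.go [x, '#'] [r] fuel l acc = acc.reverse ++ repl x r l := by
  intro fuel
  induction fuel with
  | zero =>
    intro l acc h
    have : l = [] := by cases l <;> simp_all
    subst this; simp [PySem.Chars.replace.go, repl]
  | succ n ih =>
    intro l acc h
    match l with
    | [] => simp [PySem.Chars.replace.go, repl]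
    | [a] =>
      have hp : ([x, '#'].isPrefixOf [a]) = false := by simp [List.isPrefixOf]
      simp only [PySem.Chars.replace.go, hp, Bool.false_eq_true, if_false]
      rw [ih [] (a :: acc) (by simp)]
      simp [repl]
    | a :: b :: t =>
      by_cases hp : a = x ∧ b = '#'
      · have hp' : ([x, '#'].isPrefixOf (a :: b :: t)) = true := by
          simp [List.isPrefixOf, hp.1.symm, hp.2]
        simp only [PySem.Chars.replace.go, hp', if_true]
        rw [show ([x,'#'] : List Char).length = 2 from rfl]
        rw [ih (List.drop 2 (a :: b :: t)) _ (by simp at h ⊢; omega)]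
        simp [repl, hp]
      · have hp' : ([x, '#'].isPrefixOf (a :: b :: t)) = false := by
          simp only [List.isPrefixOf, Bool.and_eq_false_iff, beq_eq_false_iff_ne, ne_eq,
            Bool.and_true]
          by_cases hx : a = x
          · right; intro hb; exact hp ⟨hx, hb.symm⟩
          · left; intro hb; exact hx hb.symm
        simp only [PySem.Chars.replace.go, hp', Bool.false_eq_true, if_false]
        rw [ih (b :: t) (a :: acc) (by simp at h ⊢; omega)]
        simp [repl, hp]

lemma replace_eq_repl (x r : Char) (l : List Char) :
    PySem.Chars.replace l [x, '#'] [r] = repl x r l := by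
  rw [PySem.Chars.replace]
  simpa using go_repl x r l.length l [] le_rfl

def hasPair (y : Char) : List Char → Bool
  | a :: b :: t => (a == y && b == '#') || hasPair y (b :: t)
  | _ => false

lemma hasPair_cons (y a : Char) (m : List Char) :
    hasPair y (a :: m) = ((a == y && m.head? == some '#') || hasPair y m) := by
  cases m <;> simp [hasPair]

lemma infix_iff_hasPair (y : Char) (l : List Char) :
    [y, '#'] <:+: l ↔ hasPair y l = true := by
  induction l with
  | nil => simp [hasPair]
  | cons a t ih =>
    rw [List.infix_cons_iff, hasPair_cons, ih]
    constructor
    · rintro (hpre | hinf)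
      · rcases hpre with ⟨s, hs⟩
        cases t with
        | nil => simp at hs
        | cons b t' =>
          simp at hs
          obtain ⟨h1, h2, -⟩ := hs
          subst h1; subst h2
          simp
      · simp [hinf]
    · intro h
      rcases Bool.or_eq_true_iff.mp h with h1 | h2
      · left
        cases t with
        | nil => simp at h1
        | cons b t' =>
          simp at h1
          exact ⟨t', by simp [h1.1, h1.2]⟩
      · right; exact h2

lemma isIn_pair (y : Char) (l : List Char) :
    PySem.Chars.isIn [y, '#'] l = hasPair y l := by
  cases h : hasPair y l with
  | true => exact (PySem.Chars.isIn_iff_infix _ _).mpr ((infix_iff_hasPair _ _).mpr h)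
  | false =>
    cases hi : PySem.Chars.isIn [y, '#'] l with
    | false => rfl
    | true =>
      have := (infix_iff_hasPair y l).mp ((PySem.Chars.isIn_iff_infix _ _).mp hi)
      rw [this] at h; exact h

lemma repl_eq_of_not_hasPair (x r : Char) (l : List Char) (h : hasPair x l = false) :
    repl x r l = l := by
  induction l using repl.induct x with
  | case1 a b t hp ih =>
    rw [hasPair_cons] at h
    simp only [hp.1, hp.2] at h
    simp at h
  | case2 a b t hp ih =>
    rw [hasPair_cons] at h
    simp only [Bool.or_eq_false_iff] at h
    rw [repl, if_neg hp, ih h.2]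
  | case3 l hl =>
    match l, hl with
    | [], _ => rfl
    | [a], _ => rfl
    | a :: b :: t, hl => exact (hl a b t rfl).elim

lemma head?_repl (x r : Char) (l : List Char) :
    (repl x r l).head? = some r ∨ (repl x r l).head? = l.head? := by
  induction l using repl.induct x with
  | case1 a b t hp ih => left; simp [repl, hp]
  | case2 a b t hp ih => right; simp [repl, hp]
  | case3 l hl =>
    match l, hl with
    | [], _ => right; rfl
    | [a], _ => right; rfl
    | a :: b :: t, hl => exact (hl a b t rfl).elim

lemma repl_ne_nil (x r : Char) (l : List Char) (h : l ≠ []) : repl x r l ≠ [] := by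
  match l with
  | [] => exact absurd rfl h
  | [a] => simp [repl]
  | a :: b :: t => rw [repl]; split <;> simp

lemma hasPair_of_cons_false (y b : Char) (t : List Char) (h : hasPair y (b :: t) = false) :
    hasPair y t = false := by
  rw [hasPair_cons] at h
  simp only [Bool.or_eq_false_iff] at h
  exact h.2

lemma hasPair_repl (x r y : Char) (hr : r ≠ '#') (hry : y ≠ r) (l : List Char)
    (h : y = x ∨ hasPair y l = false) : hasPair y (repl x r l) = false := by
  induction l using repl.induct x with
  | case1 a b t hp ih =>
    rw [repl, if_pos hp, hasPair_cons]
    have hrec : hasPair y (repl x r t) = false := by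
      apply ih
      rcases h with h | h
      · exact Or.inl h
      · right
        rw [hasPair_cons] at h
        simp only [Bool.or_eq_false_iff] at h
        exact hasPair_of_cons_false y b t h.2
    rw [hrec]
    simp only [Bool.or_false, Bool.and_eq_false_iff, beq_eq_false_iff_ne, ne_eq]
    left
    exact fun hh => hry hh.symm
  | case2 a b t hp ih =>
    rw [repl, if_neg hp, hasPair_cons]
    have h2 : y = x ∨ hasPair y (b :: t) = false := by
      rcases h with h | h
      · exact Or.inl h
      · right; rw [hasPair_cons] at h; simp only [Bool.or_eq_false_iff] at h; exact h.2
    rw [ih h2]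
    simp only [Bool.or_false, Bool.and_eq_false_iff]
    by_cases hay : a = y
    · right
      rcases head?_repl x r (b :: t) with hh | hh
      · rw [hh]; simp [hr]
      · rw [hh]
        simp only [List.head?_cons, beq_eq_false_iff_ne, ne_eq, Option.some.injEq]
        intro hb
        rcases h with h | h
        · exact hp ⟨hay ▸ h ▸ rfl, hb⟩
        · rw [hasPair_cons] at h
          simp only [Bool.or_eq_false_iff, Bool.and_eq_false_iff] at h
          rcases h.1 with h1 | h1
          · simp [hay] at h1
          · simp [hb] at h1
    · left; simp [hay]
  | case3 l hl =>
    match l, hl with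
    | [], _ => rfl
    | [a], _ => rfl
    | a :: b :: t, hl => exact (hl a b t rfl).elim

-- the unconditional five-stage replacement chain both trans and _flat compute
def comp (l : List Char) : List Char :=
  repl 'A' 'a' (repl 'G' 'g' (repl 'F' 'f' (repl 'D' 'd' (repl 'C' 'c' l))))

lemma stage_eq (x r : Char) (l : List Char) :
    (if PySem.Chars.isIn [x, '#'] l then PySem.Chars.replace l [x, '#'] [r] else l) = repl x r l := by
  rw [isIn_pair]
  cases h : hasPair x l with
  | false => rw [if_neg (by simp), repl_eq_of_not_hasPair x r l h]
  | true => rw [if_pos rfl, replace_eq_repl]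

lemma transC_eq_comp (l : List Char) : transC l = comp l := by
  simp only [transC, stage_eq]; rfl

lemma flatC_eq_comp (l : List Char) : flatC l = comp l := by
  simp only [flatC, List.foldl, replace_eq_repl]; rfl

lemma flatP_eq_transP (s : String) : flatP s = transP s := by
  simp only [flatP, transP, flatC_eq_comp, transC_eq_comp]

lemma hp_pres (x r y : Char) (hr : r ≠ '#') (hry : y ≠ r) (l : List Char)
    (h : hasPair y l = false) : hasPair y (repl x r l) = false :=
  hasPair_repl x r y hr hry l (Or.inr h)

lemma hp_self (x r : Char) (hr : r ≠ '#') (hrx : x ≠ r) (l : List Char) :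
    hasPair x (repl x r l) = false :=
  hasPair_repl x r x hr hrx l (Or.inl rfl)

lemma comp_hasPair_C (l : List Char) : hasPair 'C' (comp l) = false :=
  hp_pres _ _ _ (by decide) (by decide) _ (hp_pres _ _ _ (by decide) (by decide) _
    (hp_pres _ _ _ (by decide) (by decide) _ (hp_pres _ _ _ (by decide) (by decide) _
      (hp_self _ _ (by decide) (by decide) l))))

lemma comp_hasPair_D (l : List Char) : hasPair 'D' (comp l) = false :=
  hp_pres _ _ _ (by decide) (by decide) _ (hp_pres _ _ _ (by decide) (by decide) _
    (hp_pres _ _ _ (by decide) (by decide) _ (hp_self _ _ (by decide) (by decide) _)))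

lemma comp_hasPair_F (l : List Char) : hasPair 'F' (comp l) = false :=
  hp_pres _ _ _ (by decide) (by decide) _ (hp_pres _ _ _ (by decide) (by decide) _
    (hp_self _ _ (by decide) (by decide) _))

lemma comp_hasPair_G (l : List Char) : hasPair 'G' (comp l) = false :=
  hp_pres _ _ _ (by decide) (by decide) _ (hp_self _ _ (by decide) (by decide) _)

lemma comp_hasPair_A (l : List Char) : hasPair 'A' (comp l) = false :=
  hp_self _ _ (by decide) (by decide) _

lemma comp_idem (l : List Char) : comp (comp l) = comp l := by
  conv_lhs => rw [comp]
  rw [repl_eq_of_not_hasPair _ _ _ (comp_hasPair_C l),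
      repl_eq_of_not_hasPair _ _ _ (comp_hasPair_D l),
      repl_eq_of_not_hasPair _ _ _ (comp_hasPair_F l),
      repl_eq_of_not_hasPair _ _ _ (comp_hasPair_G l),
      repl_eq_of_not_hasPair _ _ _ (comp_hasPair_A l)]

lemma toList_transP (s : String) : (transP s).toList = transC s.toList := by
  simp [transP]

lemma toList_ofList_chars (l : List Char) : (String.ofList l).toList = l := by simp

lemma str_empty_of_toList (s : String) (h : s.toList = []) : s = "" := by
  have := congrArg String.ofList h
  simpa using this

lemma transP_idem (s : String) : transP (transP s) = transP s := by
  simp only [transP, transC_eq_comp, toList_ofList_chars]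
  rw [comp_idem]

lemma comp_ne_nil (l : List Char) (h : l ≠ []) : comp l ≠ [] := by
  unfold comp
  exact repl_ne_nil _ _ _ (repl_ne_nil _ _ _ (repl_ne_nil _ _ _ (repl_ne_nil _ _ _
    (repl_ne_nil _ _ _ h))))

-- the matched entry (if any) one well-formed info line contributes, given the flattened m
def entry? (mt : List Char) (i : String) : Option (Int × String × String) :=
  match PySem.Str.split? i "," with
  | some [start, end_, title, cont] =>
    match preTime? end_, preTime? start with
    | some te, some ts =>
      let contT := transP cont
      let play : Int := te - ts
      let l2 : Int := PySem.Str.len contT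
      let temp : List Char :=
        if l2 < play then
          match PySem.Int.divmod? play l2 with
          | none => []
          | some (a, b) =>
            if b = 0 then List.flatten (List.replicate a.toNat contT.toList)
            else List.flatten (List.replicate a.toNat contT.toList) ++
                 PySem.Chars.slice contT.toList none (some b)
        else PySem.Chars.slice contT.toList none (some play)
      if PySem.Chars.isIn mt temp then some (play, start, title) else none
    | _, _ => none
  | _ => none

def bestStep (b : Option (Int × String × String)) (e : Int × String × String) :
    Option (Int × String × String) :=
  match b with
  | none => some e
  | some c => if decide (e.1 > c.1) || (decide (e.1 = c.1) && decide (e.2.1 < c.2.1)) then some e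
              else some c

lemma getTimeA_eq : getTimeA = preTime? := rfl
lemma minutesB_eq : minutesB = preTime? := rfl

lemma len_transP_ne_zero (cont : String) (h : cont ≠ "") :
    (PySem.Str.len (transP cont) : Int) ≠ 0 := by
  have h1 : cont.toList ≠ [] := fun hc => h (str_empty_of_toList cont hc)
  have h2 : (transP cont).toList ≠ [] := by
    rw [toList_transP, transC_eq_comp]
    exact comp_ne_nil _ h1
  simp only [PySem.Str.len_eq]
  simp only [ne_eq, Nat.cast_eq_zero, List.length_eq_zero_iff]
  intro hx
  exact h2 (by simpa using hx)

lemma combineA (C : Bool) (p : Int × String × String) (m' : String)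
    (arr : List (Int × String × String)) :
    (if C = true then some (m', arr ++ [p]) else some (m', arr)) =
      some (m', arr ++ (if C = true then some p else none).toList) := by
  cases C <;> simp

lemma combineNone (C : Bool) (e : Int × String × String) :
    (if (C && true) = true then some (some e) else (some none : Option (Option (Int × String × String)))) =
      some (match (if C = true then some e else none) with
            | none => none
            | some e' => some e') := by
  cases C <;> rfl

lemma combineSome (C : Bool) (f : Int × String × String → Bool) (e c : Int × String × String) :
    (if (C && f e) = true then some (some e) else (some (some c) : Option (Option (Int × String × String)))) =
      some (match (if C = true then some e else none) with
            | none => some c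
            | some e' => if f e' = true then some e' else some c) := by
  cases C
  · rfl
  · cases hfe : f e <;> simp [hfe]

set_option maxHeartbeats 1000000 in
lemma stepA_eq (m : String) (arr : List (Int × String × String)) (i : String)
    (h : preItem i = true) :
    stepA (some (m, arr)) i =
      some (transP m, arr ++ (entry? (transP m).toList i).toList) := by
  unfold preItem at h
  split at h
  case h_2 => simp at h
  case h_1 start end_ x cont heq =>
  split at h
  case h_2 => simp at h
  case h_1 ts te hts hte =>
  unfold stepA entry?
  rw [heq]
  dsimp only
  rw [getTimeA_eq, hts, hte]
  dsimp only
  have hlen0 : (0:Int) ≤ PySem.Str.len (transP cont) := by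
    rw [PySem.Str.len_eq]; positivity
  by_cases hcond : (PySem.Str.len (transP cont) : Int) < te - ts
  · rw [if_pos hcond, if_pos hcond]
    have hplaypos : (0:Int) < te - ts := lt_of_le_of_lt hlen0 hcond
    have hcont : cont ≠ "" := by
      rcases Bool.or_eq_true_iff.mp h with h1 | h1
      · simpa using h1
      · exfalso; simp only [decide_eq_true_eq] at h1; omega
    have hl2 : (PySem.Str.len (transP cont) : Int) ≠ 0 := len_transP_ne_zero cont hcont
    rw [PySem.Int.divmod?, if_neg hl2]
    dsimp only
    by_cases hbz : (te - ts).fmod (PySem.Str.len (transP cont)) = 0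
    · simp only [if_pos hbz]
      exact combineA _ _ _ _
    · simp only [if_neg hbz]
      exact combineA _ _ _ _
  · rw [if_neg hcond, if_neg hcond]
    exact combineA _ _ _ _

-- B's clipped window equals A's divmod construction
lemma take_flatten_replicate (c : List Char) (q b : Nat) (hb : b ≤ c.length) :
    (List.flatten (List.replicate (q + 1) c)).take (q * c.length + b) =
      List.flatten (List.replicate q c) ++ c.take b := by
  induction q with
  | zero => simp
  | succ n ih =>
    rw [show n + 1 + 1 = (n + 1) + 1 from rfl]
    rw [List.replicate_succ, List.flatten_cons]
    rw [show (n + 1) * c.length + b = c.length + (n * c.length + b) by ring]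
    rw [List.take_append]
    rw [List.take_of_length_le (by omega), show c.length + (n * c.length + b) - c.length = n * c.length + b by omega, ih]
    rw [List.replicate_succ, List.flatten_cons, List.append_assoc]

lemma clip_eq (c : List Char) (play : Int) (hlt : (c.length : Int) < play) (hc : c ≠ []) :
    PySem.Chars.slice
        (List.flatten (List.replicate ((play.fdiv c.length) + 1).toNat c)) none (some play) =
      (if play.fmod c.length = 0 then List.flatten (List.replicate (play.fdiv c.length).toNat c)
       else List.flatten (List.replicate (play.fdiv c.length).toNat c) ++
            PySem.Chars.slice c none (some (play.fmod c.length))) := by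
  have hL : (0:Int) < (c.length : Int) := by
    simp only [Nat.cast_pos, List.length_pos_iff]; exact hc
  have hplay : (0:Int) < play := lt_trans hL hlt
  set q := play.fdiv (c.length : Int) with hq
  set b := play.fmod (c.length : Int) with hbdef
  have hid : (c.length : Int) * q + b = play := Int.mul_fdiv_add_fmod play (c.length : Int)
  have hb0 : 0 ≤ b := Int.fmod_nonneg (le_of_lt hplay) (le_of_lt hL)
  have hblt : b < (c.length : Int) := Int.fmod_lt_of_pos play hL
  have hq1 : 1 ≤ q := by nlinarith
  have htn : play.toNat = q.toNat * c.length + b.toNat := by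
    zify
    rw [Int.toNat_of_nonneg (le_of_lt hplay), Int.toNat_of_nonneg (by omega),
        Int.toNat_of_nonneg hb0]
    linarith [hid]
  have hq1n : (q + 1).toNat = q.toNat + 1 := by omega
  rw [PySem.Chars.slice, PySem.List.slice_to _ (le_of_lt hplay)]
  rw [htn, hq1n, take_flatten_replicate c q.toNat b.toNat (by omega)]
  by_cases hbz : b = 0
  · rw [if_pos hbz]
    simp [hbz]
  · rw [if_neg hbz]
    rw [PySem.Chars.slice, PySem.List.slice_to _ hb0]

lemma foldl_ext {α β : Type} (f g : β → α → β) (hfg : ∀ b x, f b x = g b x) (L : List α) :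
    ∀ (init : β), L.foldl f init = L.foldl g init := by
  induction L with
  | nil => intro init; rfl
  | cons x L ih => intro init; rw [List.foldl_cons, List.foldl_cons, hfg]; exact ih _

set_option maxHeartbeats 400000 in
lemma stepB_eq (mt : List Char) (best : Option (Int × String × String)) (i : String)
    (h : preItem i = true) :
    stepB mt (some best) i =
      some (match entry? mt i with | none => best | some e => bestStep best e) := by
  unfold preItem at h
  split at h
  case h_2 => simp at h
  case h_1 start end_ x cont heq =>
  split at h
  case h_2 => simp at h
  case h_1 ts te hts hte =>
  unfold stepB entry?
  rw [heq]
  dsimp only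
  rw [minutesB_eq, hts, hte]
  dsimp only
  rw [flatP_eq_transP]
  have hlen0 : (0:Int) ≤ PySem.Str.len (transP cont) := by
    rw [PySem.Str.len_eq]; positivity
  by_cases hcond : (PySem.Str.len (transP cont) : Int) < te - ts
  · have hgt : te - ts > (PySem.Str.len (transP cont) : Int) := hcond
    rw [if_pos hgt, if_pos hcond]
    have hplaypos : (0:Int) < te - ts := lt_of_le_of_lt hlen0 hcond
    have hcont : cont ≠ "" := by
      rcases Bool.or_eq_true_iff.mp h with h1 | h1
      · simpa using h1
      · exfalso; simp only [decide_eq_true_eq] at h1; omega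
    have hl2 : (PySem.Str.len (transP cont) : Int) ≠ 0 := len_transP_ne_zero cont hcont
    rw [PySem.Int.floordiv?, if_neg hl2, PySem.Int.divmod?, if_neg hl2]
    dsimp only
    have hc' : (transP cont).toList ≠ [] := by
      rw [toList_transP, transC_eq_comp]
      exact comp_ne_nil _ (fun hcc => hcont (str_empty_of_toList cont hcc))
    have hlen : ((transP cont).toList.length : Int) = (PySem.Str.len (transP cont) : Int) := by
      rw [PySem.Str.len_eq]
    rw [show PySem.Str.len (transP cont) = ((transP cont).toList.length : Int) from hlen.symm]
    rw [clip_eq (transP cont).toList (te - ts) (by rw [hlen]; exact hcond) hc']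
    by_cases hbz : (te - ts).fmod (((transP cont).toList.length : Int)) = 0
    · simp only [if_pos hbz]
      cases best with
      | none => exact combineNone _ _
      | some c =>
        dsimp only [bestStep]
        exact combineSome _
          (fun e' => decide (e'.1 > c.1) || (decide (e'.1 = c.1) && decide (e'.2.1 < c.2.1)))
          (te - ts, start, x) c
    · simp only [if_neg hbz]
      cases best with
      | none => exact combineNone _ _
      | some c =>
        dsimp only [bestStep]
        exact combineSome _
          (fun e' => decide (e'.1 > c.1) || (decide (e'.1 = c.1) && decide (e'.2.1 < c.2.1)))
          (te - ts, start, x) c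
  · have hng : ¬ (te - ts > (PySem.Str.len (transP cont) : Int)) := hcond
    rw [if_neg hng, if_neg hcond]
    cases best with
    | none => exact combineNone _ _
    | some c =>
      dsimp only [bestStep]
      exact combineSome _
        (fun e' => decide (e'.1 > c.1) || (decide (e'.1 = c.1) && decide (e'.2.1 < c.2.1)))
        (te - ts, start, x) c

-- folding A's loop under the precondition: the m-state stays transP m, arr collects entry?
lemma foldA_eq (L : List String) : ∀ (m : String) (arr : List (Int × String × String)),
    L.all preItem = true →
    ∃ m', L.foldl stepA (some (m, arr)) =
      some (m', arr ++ L.filterMap (entry? (transP m).toList)) := by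
  induction L with
  | nil => intro m arr _; exact ⟨m, by simp⟩
  | cons i L ih =>
    intro m arr hall
    simp only [List.all_cons, Bool.and_eq_true] at hall
    rw [List.foldl_cons, stepA_eq m arr i hall.1]
    obtain ⟨m', hm'⟩ := ih (transP m) (arr ++ (entry? (transP m).toList i).toList) hall.2
    refine ⟨m', ?_⟩
    rw [hm', transP_idem]
    cases htt : entry? (transP m).toList i <;> simp [List.filterMap_cons, htt]

-- folding B's loop under the precondition
lemma foldB_eq (mt : List Char) (L : List String) :
    ∀ (best : Option (Int × String × String)), L.all preItem = true →
    L.foldl (stepB mt) (some best) =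
      some ((L.filterMap (entry? mt)).foldl bestStep best) := by
  induction L with
  | nil => intro best _; simp
  | cons i L ih =>
    intro best hall
    simp only [List.all_cons, Bool.and_eq_true] at hall
    rw [List.foldl_cons, stepB_eq mt best i hall.1]
    cases htt : entry? mt i <;>
      simp only [List.filterMap_cons, htt, List.foldl_cons] <;> exact ih _ hall.2

-- head of the stable insertion sort = running strict-min fold, for ANY comparison
def minStep {α : Type} (lt : α → α → Bool) (b : Option α) (x : α) : Option α :=
  match b with
  | none => some x
  | some c => if lt x c then some x else some c

lemma head_insertBy_fold {α : Type} (lt : α → α → Bool) (L : List α) :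
    ∀ (acc : List α) (m : α), acc.head? = some m →
    (L.foldl (fun acc x => PySem.List.insertBy lt x acc) acc).head? =
      L.foldl (minStep lt) (some m) := by
  induction L with
  | nil => intro acc m h; simpa using h
  | cons x L ih =>
    intro acc m h
    match acc, h with
    | m :: rest, h =>
      simp only [List.head?_cons, Option.some.injEq] at h
      subst h
      rw [List.foldl_cons, List.foldl_cons]
      rw [PySem.List.insertBy]
      by_cases hlt : lt x m = true
      · rw [if_pos hlt]
        rw [show minStep lt (some m) x = some x by rw [minStep]; rw [if_pos hlt]]
        exact ih _ x rfl
      · rw [if_neg hlt]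
        rw [show minStep lt (some m) x = some m by rw [minStep]; rw [if_neg hlt]]
        exact ih _ m rfl

lemma head_insertBy_fold_nil {α : Type} (lt : α → α → Bool) (L : List α) :
    (L.foldl (fun acc x => PySem.List.insertBy lt x acc) []).head? =
      L.foldl (minStep lt) none := by
  cases L with
  | nil => rfl
  | cons x L =>
    rw [List.foldl_cons, List.foldl_cons]
    rw [show PySem.List.insertBy lt x [] = [x] from rfl]
    rw [show minStep lt none x = some x from rfl]
    exact head_insertBy_fold lt L [x] x rfl

-- B's strict-improvement test is exactly the sort's (-play, start) comparison
def myLt (a b : Int × String × String) : Bool :=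
  decide (-a.1 < -b.1) || (!decide (-b.1 < -a.1) && decide (a.2.1 < b.2.1))

lemma myLt_eq (e c : Int × String × String) :
    myLt e c = (decide (e.1 > c.1) || (decide (e.1 = c.1) && decide (e.2.1 < c.2.1))) := by
  unfold myLt
  rcases lt_trichotomy e.1 c.1 with h | h | h
  · have h1 : ¬ (-e.1 < -c.1) := by omega
    have h2 : (-c.1 < -e.1) := by omega
    have h3 : ¬ (e.1 > c.1) := by omega
    have h4 : ¬ (e.1 = c.1) := by omega
    simp [h1, h2, h3, h4]
  · simp [h]
  · have h1 : (-e.1 < -c.1) := by omega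
    simp [h1, h]

lemma bestStep_eq_minStep (b : Option (Int × String × String)) (e : Int × String × String) :
    bestStep b e = minStep myLt b e := by
  cases b with
  | none => rfl
  | some c => rw [bestStep, minStep, myLt_eq]

-- the final selection: first element of the stable sort by (-play, start) = running best
lemma select_eq (F : List (Int × String × String)) :
    (if F = [] then "(None)"
     else (((PySem.List.sorted2 F (fun e => -e.1) (fun e => e.2.1)).headD (0, "", "")).2.2)) =
    (match F.foldl bestStep none with
     | none => "(None)"
     | some e => e.2.2) := by
  have hsort : PySem.List.sorted2 F (fun e => -e.1) (fun e => e.2.1) =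
      F.foldl (fun acc x => PySem.List.insertBy myLt x acc) [] := rfl
  have hfold : F.foldl bestStep none = F.foldl (minStep myLt) none :=
    foldl_ext _ _ bestStep_eq_minStep F none
  by_cases hF : F = []
  · subst hF; simp
  · rw [if_neg hF, hfold, ← head_insertBy_fold_nil myLt F, ← hsort]
    have hne : PySem.List.sorted2 F (fun e => -e.1) (fun e => e.2.1) ≠ [] := by
      intro hnil
      have hperm := PySem.List.sorted2_perm (xs := F)
        (k1 := fun e : Int × String × String => -e.1) (k2 := fun e => e.2.1) (rev := false)
      rw [hnil] at hperm
      exact hF hperm.symm.eq_nil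
    cases hs : PySem.List.sorted2 F (fun e => -e.1) (fun e => e.2.1) with
    | nil => exact absurd hs hne
    | cons y t => simp

-- ===== VERDICT (by name: the statement is the Claim_ definition above) =====
theorem solution_spec : Claim_equal_solution := by
  intro m musicinfos _hdom hpre
  unfold Spec_solution solution solution_alt
  have hall : musicinfos.all preItem = true := hpre
  obtain ⟨m', hA⟩ := foldA_eq musicinfos m [] hall
  dsimp only
  rw [hA, flatP_eq_transP, foldB_eq (transP m).toList musicinfos none hall]
  dsimp only
  rw [List.nil_append, select_eq]
  cases hfin : (musicinfos.filterMap (entry? (transP m).toList)).foldl bestStep none <;> rfl
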